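-- pv_equiv track=rewrite | github.com/yliborio/Integradora-II-2019-1 | test.py | separateWhere
-- ===== SOURCE A (Python) =====
-- def separateWhere(query):
--     search = query.split("from")
--     if(len(search) == 1 ):
--         return ""
--     search = search[1:] # search[0] contem o que veio antes do primeiro
--     res = ""            # where
--     for p in search:
--         res+=p
--     return res
-- ===== SOURCE B (Python) =====
-- def separateWhere(query):
--     idx = query.find("from")
--     if idx == -1:
--         return ""
--     return query[idx + 4:].replace("from", "")
-- ===== Notes on version B (the rewrite author's own statement) =====
-- stated objective: simpler
-- what changed: Replaces A's split-into-list followed by a loop that concatenates all parts after the first with a direct find of the first 'from', a slice past it, and a replace that removes the remaining occurrences.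
import Mathlib
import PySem

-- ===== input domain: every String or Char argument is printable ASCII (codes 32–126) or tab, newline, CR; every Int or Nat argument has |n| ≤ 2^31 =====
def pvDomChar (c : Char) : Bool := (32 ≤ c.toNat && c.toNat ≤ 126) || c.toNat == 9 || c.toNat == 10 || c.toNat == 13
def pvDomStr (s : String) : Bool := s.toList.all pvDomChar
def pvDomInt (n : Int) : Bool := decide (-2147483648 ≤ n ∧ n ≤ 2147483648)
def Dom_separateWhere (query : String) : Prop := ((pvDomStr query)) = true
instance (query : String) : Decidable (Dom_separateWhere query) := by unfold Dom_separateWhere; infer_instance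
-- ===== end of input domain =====

-- B replaces A's split-into-list-and-loop-concatenate with find + slice + replace (objective: simpler).

-- ===== PORT A =====
-- A: search = query.split("from"); if len == 1 return ""; concatenate search[1:] in a loop.
def separateWhere (query : String) : String :=
  let search := PySem.Chars.splitOn query.toList "from".toList
  if search.length = 1 then ""
  else
    let search := PySem.List.slice search (some 1) none
    String.ofList (search.foldl (fun res p => res ++ p) [])

-- ===== PORT B =====
-- B: idx = query.find("from"); if idx == -1 return ""; return query[idx+4:].replace("from", "").
def separateWhere_alt (query : String) : String :=
  let idx := PySem.Str.find query "from"
  if idx = -1 then ""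
  else PySem.Str.replace (PySem.Str.slice query (some (idx + 4)) none) "from" ""

-- ===== PRECONDITION & SPEC =====
def Spec_separateWhere (query : String) (out : String) : Prop := out = separateWhere_alt query
instance (query : String) (out : String) : Decidable (Spec_separateWhere query out) := by unfold Spec_separateWhere; infer_instance

-- ===== CLAIM (what is proved, stated in full; the proofs are below) =====
def Claim_equal_separateWhere : Prop := ∀ (query : String), Dom_separateWhere query → Spec_separateWhere query (separateWhere query)

-- ===== LEMMAS AND PROOFS =====

-- Pure (fuel-free) clone of PySem.Chars.splitOn.go's scan.
def spP (sep : List Char) : List Char → List Char → List (List Char)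
  | [], cur => [cur.reverse]
  | c :: rest, cur =>
    if sep.isPrefixOf (c :: rest) then
      cur.reverse :: spP sep ((c :: rest).drop (max sep.length 1)) []
    else spP sep rest (c :: cur)
termination_by l _ => l.length
decreasing_by all_goals (simp [List.length_drop]; try omega)

-- Pure clone of PySem.Chars.replace.go's scan, specialised to new = [].
def rpP (sep : List Char) : List Char → List Char
  | [] => []
  | c :: rest =>
    if sep.isPrefixOf (c :: rest) then rpP sep ((c :: rest).drop (max sep.length 1))
    else c :: rpP sep rest
termination_by l => l.length
decreasing_by all_goals (simp [List.length_drop]; try omega)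

theorem splitOn_go_eq_spP (sep : List Char) (hs : sep ≠ []) :
    ∀ (fuel : Nat) (l cur : List Char) (acc : List (List Char)), l.length ≤ fuel →
      PySem.Chars.splitOn.go sep fuel l cur acc = acc.reverse ++ spP sep l cur := by
  intro fuel
  induction fuel with
  | zero =>
    intro l cur acc hl
    have : l = [] := by cases l <;> simp_all
    subst this
    simp [PySem.Chars.splitOn.go, spP]
  | succ fuel ih =>
    intro l cur acc hl
    cases l with
    | nil => simp [PySem.Chars.splitOn.go, spP]
    | cons c rest =>
      have hmax : max sep.length 1 = sep.length := by
        cases sep <;> simp_all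
      by_cases hp : sep.isPrefixOf (c :: rest) = true
      · have hlen : ((c :: rest).drop sep.length).length ≤ fuel := by
          have : 1 ≤ sep.length := by cases sep <;> simp_all
          simp [List.length_drop] at *
          omega
        simp only [PySem.Chars.splitOn.go, hp, if_true]
        rw [ih _ _ _ hlen]
        simp [spP, hp, hmax]
      · have hlen : rest.length ≤ fuel := by simp at hl; omega
        simp only [PySem.Chars.splitOn.go, hp]
        rw [ih _ _ _ hlen]
        simp [spP, hp]

theorem replace_go_eq_rpP (sep : List Char) (hs : sep ≠ []) :
    ∀ (fuel : Nat) (l acc : List Char), l.length ≤ fuel →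
      PySem.Chars.replace.go sep [] fuel l acc = acc.reverse ++ rpP sep l := by
  intro fuel
  induction fuel with
  | zero =>
    intro l acc hl
    have : l = [] := by cases l <;> simp_all
    subst this
    simp [PySem.Chars.replace.go, rpP]
  | succ fuel ih =>
    intro l acc hl
    cases l with
    | nil => simp [PySem.Chars.replace.go, rpP]
    | cons c rest =>
      have hmax : max sep.length 1 = sep.length := by cases sep <;> simp_all
      by_cases hp : sep.isPrefixOf (c :: rest) = true
      · have hlen : ((c :: rest).drop sep.length).length ≤ fuel := by
          have : 1 ≤ sep.length := by cases sep <;> simp_all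
          simp [List.length_drop] at *
          omega
        simp only [PySem.Chars.replace.go, hp, if_true]
        rw [ih _ _ hlen]
        simp [rpP, hp, hmax]
      · have hlen : rest.length ≤ fuel := by simp at hl; omega
        simp only [PySem.Chars.replace.go, hp]
        rw [ih _ _ hlen]
        simp [rpP, hp]

theorem splitOn_eq_spP (s sep : List Char) (hs : sep ≠ []) :
    PySem.Chars.splitOn s sep = spP sep s [] := by
  unfold PySem.Chars.splitOn
  rw [splitOn_go_eq_spP sep hs _ _ _ _ (by omega)]
  simp

theorem replace_eq_rpP (s sep : List Char) (hs : sep ≠ []) :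
    PySem.Chars.replace s sep [] = rpP sep s := by
  unfold PySem.Chars.replace
  have he : sep.isEmpty = false := by cases sep <;> simp_all
  rw [he]
  simp only [Bool.false_eq_true, if_false]
  rw [replace_go_eq_rpP sep hs _ _ _ (le_refl _)]
  simp

theorem spP_ne_nil (sep : List Char) (l cur : List Char) : spP sep l cur ≠ [] := by
  induction l, cur using spP.induct sep with
  | case1 cur => simp [spP]
  | case2 c rest cur hp ih => simp [spP, hp]
  | case3 c rest cur hp ih => simpa [spP, hp] using ih

theorem spP_flatten (sep : List Char) (l cur : List Char) :
    (spP sep l cur).flatten = cur.reverse ++ rpP sep l := by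
  induction l, cur using spP.induct sep with
  | case1 cur => simp [spP, rpP]
  | case2 c rest cur hp ih => simp [spP, rpP, hp, ih]
  | case3 c rest cur hp ih => simp [spP, rpP, hp, ih]

theorem spP_not_infix (sep : List Char) (l cur : List Char) :
    ¬ sep <:+: l → spP sep l cur = [cur.reverse ++ l] := by
  induction l, cur using spP.induct sep with
  | case1 cur => intro _; simp [spP]
  | case2 c rest cur hp ih =>
    intro h
    exact absurd ((List.isPrefixOf_iff_prefix.mp hp).isInfix) h
  | case3 c rest cur hp ih =>
    intro h
    have hrest : ¬ sep <:+: rest := fun hr => h (List.infix_cons_iff.mpr (Or.inr hr))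
    simp [spP, hp, ih hrest]

theorem spP_len_ne_one (sep : List Char) (hs : sep ≠ []) (l cur : List Char) :
    sep <:+: l → (spP sep l cur).length ≠ 1 := by
  induction l, cur using spP.induct sep with
  | case1 cur =>
    intro h
    exact absurd (List.eq_nil_of_infix_nil h) hs
  | case2 c rest cur hp ih =>
    intro _
    have hne := spP_ne_nil sep ((c :: rest).drop (max sep.length 1)) []
    simp only [spP, hp, if_true, List.length_cons]
    cases hgo : spP sep ((c :: rest).drop (max sep.length 1)) [] <;> simp_all
  | case3 c rest cur hp ih =>
    intro h
    have hrest : sep <:+: rest := by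
      rcases List.infix_cons_iff.mp h with h' | h'
      · exact absurd (List.isPrefixOf_iff_prefix.mpr h') (by simp [hp])
      · exact h'
    simpa [spP, hp] using ih hrest

theorem find_go_offset (sep : List Char) (hs : sep ≠ []) : ∀ (l : List Char) (k : Nat),
    PySem.Chars.find.go sep l k =
      if PySem.Chars.find l sep = -1 then -1 else (k : Int) + PySem.Chars.find l sep := by
  intro l
  induction l with
  | nil =>
    intro k
    have he : sep.isEmpty = false := by cases sep <;> simp_all
    simp [PySem.Chars.find, PySem.Chars.find.go, he]
  | cons c rest ih =>
    intro k
    by_cases hp : sep.isPrefixOf (c :: rest) = true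
    · simp [PySem.Chars.find, PySem.Chars.find.go, hp]
    · have hge := PySem.Chars.neg_one_le_find rest sep
      simp only [PySem.Chars.find, PySem.Chars.find.go, hp, Bool.false_eq_true, if_false]
      rw [ih (k+1), ih 1]
      by_cases hf : PySem.Chars.find rest sep = -1
      · simp [hf]
      · rw [if_neg hf, if_neg hf]
        split_ifs with h2
        · exfalso; push_cast at h2; omega
        · push_cast; ring

theorem find_cons_of_not_prefix (sep : List Char) (hs : sep ≠ []) (c : Char) (rest : List Char)
    (hp : ¬ sep.isPrefixOf (c :: rest) = true) :
    PySem.Chars.find (c :: rest) sep =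
      if PySem.Chars.find rest sep = -1 then -1 else 1 + PySem.Chars.find rest sep := by
  have h1 := find_go_offset sep hs rest 1
  simp only [PySem.Chars.find, PySem.Chars.find.go, hp, Bool.false_eq_true, if_false]
  simpa using h1

theorem find_of_prefix (sep : List Char) (c : Char) (rest : List Char)
    (hp : sep.isPrefixOf (c :: rest) = true) :
    PySem.Chars.find (c :: rest) sep = 0 := by
  simp [PySem.Chars.find, PySem.Chars.find.go, hp]

-- MAIN: concatenating the tail of the split equals removing every occurrence after skipping the first
theorem spP_tail_flatten (sep : List Char) (hs : sep ≠ []) (l cur : List Char) :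
    sep <:+: l →
      ((spP sep l cur).tail).flatten =
        rpP sep (l.drop ((PySem.Chars.find l sep).toNat + sep.length)) := by
  induction l, cur using spP.induct sep with
  | case1 cur =>
    intro h
    exact absurd (List.eq_nil_of_infix_nil h) hs
  | case2 c rest cur hp ih =>
    intro _
    have hmax : max sep.length 1 = sep.length := by cases sep <;> simp_all
    rw [find_of_prefix sep c rest hp]
    simp [spP, hp, spP_flatten, hmax]
  | case3 c rest cur hp ih =>
    intro h
    have hrest : sep <:+: rest := by
      rcases List.infix_cons_iff.mp h with h' | h'
      · exact absurd (List.isPrefixOf_iff_prefix.mpr h') (by simp [hp])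
      · exact h'
    have hner : PySem.Chars.find rest sep ≠ -1 := (PySem.Chars.find_ne_neg_one_iff rest sep).mpr hrest
    have hnn : 0 ≤ PySem.Chars.find rest sep := (PySem.Chars.find_nonneg_iff rest sep).mpr hrest
    have hfc : PySem.Chars.find (c :: rest) sep = 1 + PySem.Chars.find rest sep := by
      rw [find_cons_of_not_prefix sep hs c rest hp]; simp [hner]
    have htn : (PySem.Chars.find (c :: rest) sep).toNat = (PySem.Chars.find rest sep).toNat + 1 := by
      rw [hfc]; omega
    rw [htn]
    have harith : (PySem.Chars.find rest sep).toNat + 1 + sep.length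
         = ((PySem.Chars.find rest sep).toNat + sep.length) + 1 := by omega
    rw [harith, List.drop_succ_cons]
    simpa [spP, hp] using ih hrest

-- list-level assembly, sep generalised (A uses "from", B uses find + 4 = len("from"))
theorem char_level (sep : List Char) (hs : sep ≠ []) (hlen4 : sep.length = 4) (s : List Char) :
    (if (PySem.Chars.splitOn s sep).length = 1 then ([] : List Char)
     else (PySem.List.slice (PySem.Chars.splitOn s sep) (some 1) none).foldl (fun res p => res ++ p) []) =
    (if PySem.Chars.find s sep = -1 then ([] : List Char)
     else PySem.Chars.replace (PySem.List.slice s (some (PySem.Chars.find s sep + 4)) none) sep []) := by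
  by_cases h : sep <:+: s
  · have hfind : PySem.Chars.find s sep ≠ -1 := (PySem.Chars.find_ne_neg_one_iff s _).mpr h
    have hnn : 0 ≤ PySem.Chars.find s sep := (PySem.Chars.find_nonneg_iff s _).mpr h
    have hlen : (PySem.Chars.splitOn s sep).length ≠ 1 := by
      rw [splitOn_eq_spP s _ hs]; exact spP_len_ne_one _ hs s [] h
    rw [if_neg hlen, if_neg hfind]
    rw [splitOn_eq_spP s _ hs]
    rw [PySem.List.slice_from _ (by omega : (0:Int) ≤ 1)]
    rw [PySem.List.slice_from _ (by omega : (0:Int) ≤ PySem.Chars.find s sep + 4)]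
    rw [PySem.List.foldl_append_eq_flatten]
    have hdrop1 : List.drop (1:Int).toNat (spP sep s []) = (spP sep s []).tail := by simp
    rw [hdrop1]
    rw [replace_eq_rpP _ _ hs]
    have htn : (PySem.Chars.find s sep + 4).toNat = (PySem.Chars.find s sep).toNat + sep.length := by
      rw [hlen4]; omega
    rw [htn]
    simpa using spP_tail_flatten _ hs s [] h
  · have hfind : PySem.Chars.find s sep = -1 := (PySem.Chars.find_eq_neg_one_iff s _).mpr h
    have hlen : (PySem.Chars.splitOn s sep).length = 1 := by
      rw [splitOn_eq_spP s _ hs, spP_not_infix _ s [] h]; simp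
    rw [if_pos hlen, if_pos hfind]

-- rewrite each port into a String.ofList of its list-level value
theorem portA_eq (query : String) :
    separateWhere query = String.ofList
      (if (PySem.Chars.splitOn query.toList "from".toList).length = 1 then ([] : List Char)
       else (PySem.List.slice (PySem.Chars.splitOn query.toList "from".toList) (some 1) none).foldl
              (fun res p => res ++ p) []) := by
  unfold separateWhere
  by_cases hlen : (PySem.Chars.splitOn query.toList "from".toList).length = 1
  · rw [if_pos hlen, if_pos hlen]
  · rw [if_neg hlen, if_neg hlen]

theorem portB_eq (query : String) :
    separateWhere_alt query = String.ofList
      (if PySem.Chars.find query.toList "from".toList = -1 then ([] : List Char)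
       else PySem.Chars.replace
              (PySem.List.slice query.toList (some (PySem.Chars.find query.toList "from".toList + 4)) none)
              "from".toList []) := by
  unfold separateWhere_alt
  simp only [PySem.Str.find_eq]
  by_cases hfind : PySem.Chars.find query.toList "from".toList = -1
  · rw [if_pos hfind, if_pos hfind]
  · rw [if_neg hfind, if_neg hfind]
    simp only [PySem.Str.replace, PySem.Str.toList_slice, PySem.Chars.slice_eq_listSlice]
    rfl

-- ===== VERDICT (by name: the statement is the Claim_ definition above) =====
theorem separateWhere_spec : Claim_equal_separateWhere := by
  intro query _
  unfold Spec_separateWhere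
  rw [portA_eq, portB_eq]
  congr 1
  exact char_level "from".toList (by decide) (by decide) query.toList
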